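-- pv_equiv track=rewrite | github.com/sun-python-23w/sun-python-23w.github.io | notes/presentation.py | strip_margin
-- ===== SOURCE A (Python) =====
-- def strip_margin(s: str) -> str:
--     def _strip(l: str) -> str:
--         if "|" not in l:
--             return l
--         else:
--             bar_index = l.find("|")
--             if l[:bar_index].isspace() or bar_index == 0:
--                 return l[bar_index + 1 :]
--             else:
--                 return l
--
--     stripped_s = s.strip()
--     return "\n".join([_strip(line) for line in stripped_s.splitlines() if line != ""])
-- ===== SOURCE B (Python) =====
-- def strip_margin(s: str) -> str:
--     # One pass over the stripped text with explicit indices: no splitlines, no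
--     # per-line helper; lines are delimited and margin-stripped while scanning.
--     t = s.strip()
--     n = len(t)
--     res = []
--     first = True
--     i = 0
--     while i < n:
--         j = i
--         while j < n and t[j] != '\n' and t[j] != '\r':
--             j += 1
--         if j > i:  # non-empty line t[i:j]
--             k = i
--             while k < j and t[k].isspace():
--                 k += 1
--             start = k + 1 if k < j and t[k] == '|' else i
--             if not first:
--                 res.append('\n')
--             res.append(t[start:j])
--             first = False
--         if j < n:
--             i = j + 2 if t[j] == '\r' and j + 1 < n and t[j + 1] == '\n' else j + 1
--         else:
--             i = j
--     return ''.join(res)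
-- ===== Notes on version B (the rewrite author's own statement) =====
-- stated objective: alternative
-- what changed: Replaces A's splitlines/filter/comprehension/join pipeline (with a find/isspace helper per line) by a single explicit index scan over the stripped text that delimits lines, skips the leading whitespace-and-bar margin and emits the output with its separators on the fly.
import Mathlib
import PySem

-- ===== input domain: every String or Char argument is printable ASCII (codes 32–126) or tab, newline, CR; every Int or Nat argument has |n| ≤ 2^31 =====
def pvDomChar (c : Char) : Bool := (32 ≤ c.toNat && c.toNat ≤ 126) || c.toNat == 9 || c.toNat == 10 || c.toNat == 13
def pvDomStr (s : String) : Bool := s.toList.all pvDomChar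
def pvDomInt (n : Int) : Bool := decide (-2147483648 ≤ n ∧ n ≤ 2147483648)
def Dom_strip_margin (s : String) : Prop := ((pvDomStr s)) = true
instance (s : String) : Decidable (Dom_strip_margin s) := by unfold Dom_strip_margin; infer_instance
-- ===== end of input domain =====

-- B replaces A's splitlines/filter/map/join pipeline by a single index-style scan over the
-- stripped text that delimits lines and strips the '|' margin on the fly (objective: alternative).

-- ===== PORT A =====
-- inner helper _strip of A
def pvStripA (l : String) : String :=
  if PySem.Str.isIn "|" l = false then l
  else
    let bar := PySem.Str.find l "|"
    if PySem.Str.strIsspace (PySem.Str.slice l none (some bar)) || bar == 0 then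
      PySem.Str.slice l (some (bar + 1)) none
    else l

def strip_margin (s : String) : String :=
  let stripped := PySem.Str.strip s
  PySem.Str.join "\n"
    (((PySem.Str.splitlines stripped).filter (fun line => line != "")).map pvStripA)

-- ===== PORT B =====
-- t[j] != '\n' and t[j] != '\r' : the char is not a line break
def pvNB (c : Char) : Bool := !(c == '\n' || c == '\r')

-- the i = j + 2 / j + 1 step skipping one line separator ('\r\n', '\r' or '\n')
def pvSepSkip : List Char → List Char
  | '\r' :: '\n' :: r => r
  | _ :: r => r
  | [] => []

-- the inner k-scan and the t[start:j] slice: margin-stripped body of one line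
def pvPiece (line : List Char) : List Char :=
  match line.dropWhile PySem.Chars.isspace with
  | '|' :: r => r
  | _ => line

theorem pvSepSkip_length_lt (xs : List Char) (h : xs ≠ []) : (pvSepSkip xs).length < xs.length := by
  rw [pvSepSkip.eq_def]
  split <;> simp_all

theorem pvScanDec (c : Char) (t : List Char) :
    (pvSepSkip ((c :: t).dropWhile pvNB)).length < (c :: t).length := by
  by_cases hd : (c :: t).dropWhile pvNB = []
  · rw [hd]; simp [pvSepSkip]
  · exact lt_of_lt_of_le (pvSepSkip_length_lt _ hd) (List.length_dropWhile_le pvNB (c :: t))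

-- the outer while-loop of B: one pass over the remaining text
def pvScan : List Char → Bool → List Char
  | [], _ => []
  | c :: t, first =>
    let line := (c :: t).takeWhile pvNB
    let emitted := if line.isEmpty then [] else (if first then [] else ['\n']) ++ pvPiece line
    emitted ++ pvScan (pvSepSkip ((c :: t).dropWhile pvNB)) (first && line.isEmpty)
termination_by cs _ => cs.length
decreasing_by exact pvScanDec c t

def strip_margin_alt (s : String) : String :=
  String.ofList (pvScan (PySem.Str.strip s).toList true)

-- ===== PRECONDITION & SPEC =====
def Spec_strip_margin (s : String) (out : String) : Prop := out = strip_margin_alt s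
instance (s : String) (out : String) : Decidable (Spec_strip_margin s out) := by unfold Spec_strip_margin; infer_instance

-- ===== CLAIM (what is proved, stated in full; the proofs are below) =====
def Claim_equal_strip_margin : Prop := ∀ (s : String), Dom_strip_margin s → Spec_strip_margin s (strip_margin s)

-- ===== LEMMAS AND PROOFS =====

-- the line-break test PySem.Chars.splitlines uses (its local 'isB'), as a named function
def pvIsB (c : Char) : Bool :=
  decide (c.toNat = 10) || decide (c.toNat = 13) || decide (c.toNat = 11) || decide (c.toNat = 12) ||
    decide (c.toNat = 28) || decide (c.toNat = 29) || decide (c.toNat = 30) || decide (c.toNat = 133) ||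
    decide (c.toNat = 8232) || decide (c.toNat = 8233)

-- accumulator-free reformulation of PySem.Chars.splitlines.go
def pvLines : List Char → List Char → List (List Char)
  | [], cur => if cur.isEmpty then [] else [cur.reverse]
  | c :: rest, cur =>
    if pvIsB c then
      cur.reverse :: pvLines (if c == '\r' && rest.head? == some '\n' then rest.tail else rest) []
    else pvLines rest (c :: cur)
termination_by cs _ => cs.length
decreasing_by
  · split <;> simp
  · simp

theorem pvGo_eq : ∀ (n : Nat) (cs : List Char), cs.length ≤ n → ∀ (cur : List Char) (accL : List (List Char)),
    PySem.Chars.splitlines.go pvIsB cs cur accL = accL.reverse ++ pvLines cs cur := by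
  intro n
  induction n with
  | zero =>
    intro cs hl cur accL
    have : cs = [] := by cases cs <;> simp_all
    subst this
    rw [PySem.Chars.splitlines.go, pvLines]
    cases h : cur.isEmpty <;> simp_all [List.isEmpty_iff]
  | succ n ih =>
    intro cs hl cur accL
    cases cs with
    | nil =>
      rw [PySem.Chars.splitlines.go, pvLines]
      cases h : cur.isEmpty <;> simp_all [List.isEmpty_iff]
    | cons c rest =>
      rw [pvLines, PySem.Chars.splitlines.go.eq_def]
      split
      · simp_all
      · rename_i rest' heq
        injection heq with h1 h2
        subst h1; subst h2
        rw [ih rest' (by simp at hl ⊢; omega) [] _]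
        simp [show pvIsB '\r' = true from rfl]
      · rename_i hnotsp hne
        injection hne with h1 h2
        subst h1; subst h2
        by_cases hb : pvIsB c = true
        · rw [if_pos hb, if_pos hb]
          rw [ih rest (by simp at hl ⊢; omega) [] _]
          have hif : (c == '\r' && rest.head? == some '\n') = false := by
            cases rest with
            | nil => simp
            | cons d r =>
              by_cases hc : c = '\r'
              · subst hc
                by_cases hd : d = '\n'
                · subst hd; exact (hnotsp r rfl rfl).elim
                · simp [hd]
              · simp [hc]
          rw [hif]
          simp
        · rw [if_neg hb, if_neg hb]
          exact ih rest (by simp at hl ⊢; omega) _ _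

theorem pvSplitlines_eq (cs : List Char) : PySem.Chars.splitlines cs = pvLines cs [] := by
  have h : PySem.Chars.splitlines cs = PySem.Chars.splitlines.go pvIsB cs [] [] := rfl
  rw [h, pvGo_eq cs.length cs le_rfl]
  simp

theorem pvBeq_toNat (c d : Char) : (c == d) = decide (c.toNat = d.toNat) := by
  by_cases hc : c = d
  · subst hc; simp
  · have hn : ¬ c.toNat = d.toNat := fun hh => hc (Char.ext (UInt32.toNat_inj.mp hh))
    simp [hc, hn]

theorem pvChar_nb (c : Char) (h : pvDomChar c = true) : pvIsB c = !(pvNB c) := by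
  simp only [pvDomChar, Bool.or_eq_true, Bool.and_eq_true, decide_eq_true_eq, beq_iff_eq] at h
  simp only [pvIsB, pvNB, pvBeq_toNat, Bool.not_not]
  have h10 : ('\n').toNat = 10 := rfl
  have h13 : ('\r').toNat = 13 := rfl
  rw [h10, h13]
  apply Bool.eq_iff_iff.mpr
  simp only [Bool.or_eq_true, decide_eq_true_eq]
  omega

theorem pvSepSkip_cons (c : Char) (rest : List Char) :
    pvSepSkip (c :: rest) = if c == '\r' && rest.head? == some '\n' then rest.tail else rest := by
  cases rest with
  | nil => rw [pvSepSkip.eq_def]; split <;> simp_all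
  | cons d r =>
    by_cases hc : c = '\r'
    · subst hc
      by_cases hd : d = '\n'
      · subst hd; simp [pvSepSkip]
      · rw [pvSepSkip.eq_def]
        split
        all_goals try simp_all
        all_goals (rename_i hno heq; obtain ⟨h1, h2⟩ := heq; subst h2; simp_all)
    · rw [pvSepSkip.eq_def]
      split
      all_goals simp_all

theorem pvSepSkipNil : pvSepSkip [] = [] := by rw [pvSepSkip.eq_def]

theorem pvSepSkip_suffix (xs : List Char) : pvSepSkip xs <:+ xs := by
  rw [pvSepSkip.eq_def]
  split
  · exact (List.suffix_cons '\n' _).trans (List.suffix_cons '\r' _)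
  · exact List.suffix_cons _ _
  · exact List.nil_suffix

theorem pvLines_spec : ∀ (n : Nat) (cs : List Char), cs.length ≤ n →
    (∀ c ∈ cs, pvDomChar c = true) → ∀ (cur : List Char), (cs ≠ [] ∨ cur ≠ []) →
    pvLines cs cur = (cur.reverse ++ cs.takeWhile pvNB) :: pvLines (pvSepSkip (cs.dropWhile pvNB)) [] := by
  intro n
  induction n with
  | zero =>
    intro cs hl hdom cur hne
    have hcs : cs = [] := by cases cs <;> simp_all
    subst hcs
    have hcur : cur ≠ [] := hne.resolve_left (fun h => h rfl)
    simp only [List.takeWhile_nil, List.dropWhile_nil]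
    rw [pvSepSkipNil, pvLines, pvLines]
    simp [List.isEmpty_iff, hcur]
  | succ n ih =>
    intro cs hl hdom cur hne
    cases cs with
    | nil =>
      have hcur : cur ≠ [] := hne.resolve_left (fun h => h rfl)
      simp only [List.takeWhile_nil, List.dropWhile_nil]
      rw [pvSepSkipNil, pvLines, pvLines]
      simp [List.isEmpty_iff, hcur]
    | cons c rest =>
      have hdc : pvDomChar c = true := hdom c (List.mem_cons_self ..)
      by_cases hb : pvIsB c = true
      · have hnb : pvNB c = false := by
          have h2 := pvChar_nb c hdc
          rw [hb] at h2
          cases hpv : pvNB c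
          · rfl
          · rw [hpv] at h2; simp at h2
        have ht : (c :: rest).takeWhile pvNB = [] := by simp [hnb]
        have hd2 : (c :: rest).dropWhile pvNB = c :: rest := by simp [hnb]
        rw [pvLines, if_pos hb, ht, hd2, pvSepSkip_cons]
        simp
      · have hnb : pvNB c = true := by
          have h2 := pvChar_nb c hdc
          cases hpv : pvNB c
          · rw [hpv] at h2; simp at h2; exact absurd h2 hb
          · rfl
        rw [pvLines, if_neg hb]
        rw [ih rest (by simp at hl ⊢; omega) (fun d hd => hdom d (List.mem_cons_of_mem c hd))
            (c :: cur) (Or.inr (List.cons_ne_nil c cur))]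
        simp [hnb]

theorem pvPiece_eq_of_bar (l : List Char) (r : List Char)
    (h : l.dropWhile PySem.Chars.isspace = '|' :: r) : pvPiece l = r := by
  unfold pvPiece
  rw [h]
  rfl


theorem pvPiece_eq_self (l : List Char)
    (h : ∀ r, l.dropWhile PySem.Chars.isspace ≠ '|' :: r) : pvPiece l = l := by
  unfold pvPiece
  split
  · rename_i r heq; exact absurd heq (h r)
  · rfl

theorem pvLine_eq (l : String) : (pvStripA l).toList = pvPiece l.toList := by
  unfold pvStripA
  simp only [apply_ite String.toList, PySem.Str.isIn_eq, PySem.Str.find_eq,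
    PySem.Str.strIsspace_eq, PySem.Str.slice, String.toList_ofList,
    PySem.Chars.slice_eq_listSlice, show ("|" : String).toList = ['|'] from rfl]
  by_cases hin : PySem.Chars.isIn ['|'] l.toList = false
  · -- no bar in the line: both sides return l
    have hninf : ¬ (['|'] <:+: l.toList) := (PySem.Chars.isIn_eq_false_iff _ _).mp hin
    have hp : pvPiece l.toList = l.toList := by
      apply pvPiece_eq_self
      intro r h
      apply hninf
      have hsuf : '|' :: r <:+ l.toList := h ▸ List.dropWhile_suffix _
      exact (List.IsPrefix.isInfix ⟨r, rfl⟩).trans hsuf.isInfix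
    rw [if_pos hin, hp]
  · -- the line contains a bar at index k
    have hin' : PySem.Chars.isIn ['|'] l.toList = true := by
      cases h : PySem.Chars.isIn ['|'] l.toList
      · exact absurd h hin
      · rfl
    have hinf : ['|'] <:+: l.toList := (PySem.Chars.isIn_iff_infix _ _).mp hin'
    have hpos : 0 ≤ PySem.Chars.find l.toList ['|'] := (PySem.Chars.find_nonneg_iff _ _).mpr hinf
    obtain ⟨hpre, hmin⟩ := PySem.Chars.find_spec hpos
    set k : Nat := (PySem.Chars.find l.toList ['|']).toNat with hkdef
    have hfk : PySem.Chars.find l.toList ['|'] = (k : Int) := (Int.toNat_of_nonneg hpos).symm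
    obtain ⟨r, hr⟩ := hpre
    have hdropk : l.toList.drop k = '|' :: r := hr.symm
    have hdropk1 : l.toList.drop (k + 1) = r := by
      rw [← List.tail_drop, hdropk]
      rfl
    have hdecomp : l.toList = l.toList.take k ++ '|' :: r := by
      conv_lhs => rw [← List.take_append_drop k l.toList, hdropk]
    have hklen : k < l.toList.length := by
      have h := congrArg List.length hdropk
      rw [List.length_drop, List.length_cons] at h
      omega
    have htklen : (l.toList.take k).length = k := by
      rw [List.length_take]
      omega
    have hnbar : ∀ c ∈ l.toList.take k, c ≠ '|' := by
      intro c hc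
      rw [List.mem_iff_getElem] at hc
      obtain ⟨i, hi, hci⟩ := hc
      have hik : i < k := by omega
      intro hc'
      apply hmin i hik
      have hilen : i < l.toList.length := by omega
      rw [List.drop_eq_getElem_cons hilen]
      refine ⟨l.toList.drop (i+1), ?_⟩
      have hgi : l.toList[i] = c := by
        rw [← hci]; simp [List.getElem_take]
      simp [hgi, hc']
    rw [if_neg hin, hfk]
    by_cases hall : (l.toList.take k).all PySem.Chars.isspace
    · -- all-whitespace (possibly empty) prefix: both sides drop through the bar
      have hdw : l.toList.dropWhile PySem.Chars.isspace = '|' :: r := by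
        conv_lhs => rw [hdecomp]
        rw [List.dropWhile_append]
        have h1 : List.dropWhile PySem.Chars.isspace (l.toList.take k) = [] :=
          List.dropWhile_eq_nil_iff.mpr (fun x hx => (List.all_eq_true.mp hall) x hx)
        rw [h1]
        simp [show PySem.Chars.isspace '|' = false from rfl]
      have hcond : (PySem.Chars.strIsspace (PySem.List.slice l.toList none (some (k : Int))) || ((k : Int) == 0)) = true := by
        rcases Nat.eq_zero_or_pos k with hk0 | hkpos
        · simp [hk0]
        · rw [PySem.List.slice_to _ (by positivity)]
          simp only [Int.toNat_natCast]
          have hne : (l.toList.take k) ≠ [] := by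
            intro h; rw [h] at htklen; simp at htklen; omega
          unfold PySem.Chars.strIsspace
          simp [hall, hne]
      rw [if_pos hcond, pvPiece_eq_of_bar _ r hdw]
      have h1 : PySem.List.slice l.toList (some ((k : Int) + 1)) none = l.toList.drop (k+1) := by
        rw [show ((k : Int) + 1) = ((k + 1 : Nat) : Int) by push_cast; ring]
        rw [PySem.List.slice_from _ (by positivity)]
        simp
      rw [h1, hdropk1]
    · -- non-whitespace character before the bar: both sides keep the line
      have hk0 : k ≠ 0 := by
        intro h
        rw [h] at hall
        simp at hall
      have hcond : (PySem.Chars.strIsspace (PySem.List.slice l.toList none (some (k : Int))) || ((k : Int) == 0)) = false := by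
        rw [PySem.List.slice_to _ (by positivity)]
        simp only [Int.toNat_natCast]
        unfold PySem.Chars.strIsspace
        simp [hall]
        omega
      have hne : List.dropWhile PySem.Chars.isspace (l.toList.take k) ≠ [] := by
        rw [Ne, List.dropWhile_eq_nil_iff]
        intro h
        exact hall (List.all_eq_true.mpr (fun x hx => h x hx))
      obtain ⟨c, tl, hct⟩ := List.exists_cons_of_ne_nil hne
      have hcmem : c ∈ l.toList.take k := by
        have hmem : c ∈ List.dropWhile PySem.Chars.isspace (l.toList.take k) := by rw [hct]; simp
        exact (List.dropWhile_suffix _).subset hmem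
      have hdw : l.toList.dropWhile PySem.Chars.isspace = c :: (tl ++ '|' :: r) := by
        conv_lhs => rw [hdecomp]
        rw [List.dropWhile_append, hct]
        simp
      have hp : pvPiece l.toList = l.toList := by
        apply pvPiece_eq_self
        intro r' h
        rw [hdw] at h
        exact hnbar c hcmem (by injection h)
      rw [if_neg (by rw [hcond]; simp), hp]

theorem pvJoin_newline : ∀ (p : List Char) (ps : List (List Char)),
    PySem.Chars.join ['\n'] (p :: ps) = p ++ (ps.map (fun q => '\n' :: q)).flatten := by
  intro p ps
  induction ps generalizing p with
  | nil => simp [PySem.Chars.join, List.intercalate]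
  | cons q ps ih =>
    have step : PySem.Chars.join ['\n'] (p :: q :: ps) = p ++ ['\n'] ++ PySem.Chars.join ['\n'] (q :: ps) := by
      simp [PySem.Chars.join, List.intercalate, List.intersperse]
    rw [step, ih q]
    simp

-- margin-stripped non-empty lines of cs, as the A-side pipeline produces them
def pvPieces (cs : List Char) : List (List Char) :=
  ((pvLines cs []).filter (· ≠ [])).map pvPiece

theorem pvPieces_nil : pvPieces [] = [] := by
  unfold pvPieces
  rw [pvLines]
  rfl

theorem pvPieces_step (cs : List Char) (hdom : ∀ c ∈ cs, pvDomChar c = true) (h : cs ≠ []) :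
    pvPieces cs = (if cs.takeWhile pvNB = [] then [] else [pvPiece (cs.takeWhile pvNB)]) ++
      pvPieces (pvSepSkip (cs.dropWhile pvNB)) := by
  unfold pvPieces
  rw [pvLines_spec cs.length cs le_rfl hdom [] (Or.inl h)]
  by_cases hline : cs.takeWhile pvNB = [] <;> simp [hline]

theorem pvScan_spec : ∀ (n : Nat) (cs : List Char), cs.length ≤ n →
    (∀ c ∈ cs, pvDomChar c = true) → ∀ (first : Bool),
    pvScan cs first =
      (if first then PySem.Chars.join ['\n'] (pvPieces cs)
       else ((pvPieces cs).map (fun q => '\n' :: q)).flatten) := by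
  intro n
  induction n with
  | zero =>
    intro cs hl hdom first
    have hcs : cs = [] := by cases cs <;> simp_all
    subst hcs
    rw [pvScan, pvPieces_nil]
    cases first <;> simp [PySem.Chars.join, List.intercalate]
  | succ n ih =>
    intro cs hl hdom first
    cases cs with
    | nil =>
      rw [pvScan, pvPieces_nil]
      cases first <;> simp [PySem.Chars.join, List.intercalate]
    | cons c t =>
      have hlen' : (pvSepSkip ((c :: t).dropWhile pvNB)).length ≤ n := by
        have := pvScanDec c t
        simp at hl this ⊢
        omega
      have hdom' : ∀ d ∈ pvSepSkip ((c :: t).dropWhile pvNB), pvDomChar d = true :=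
        fun d hd => hdom d ((List.dropWhile_suffix pvNB).subset
          ((pvSepSkip_suffix _).subset hd))
      rw [pvScan, pvPieces_step (c :: t) hdom (List.cons_ne_nil c t)]
      by_cases hline : (c :: t).takeWhile pvNB = []
      · rw [ih _ hlen' hdom' (first && ((c :: t).takeWhile pvNB).isEmpty)]
        simp [hline]
      · have hlineE : ((c :: t).takeWhile pvNB).isEmpty = false := by
          simp [hline]
        rw [hlineE]
        cases first
        · simp only [Bool.false_and]
          rw [ih _ hlen' hdom' false]
          simp [hline]
        · simp only [Bool.true_and]
          rw [ih _ hlen' hdom' false]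
          simp only [hline, if_false, Bool.false_eq_true, if_true,
            List.singleton_append]
          rw [pvJoin_newline]
          simp

theorem pvMapFilter (lines : List String) :
    List.map String.toList (List.map pvStripA (List.filter (fun l => l != "") lines)) =
      List.map pvPiece (List.filter (· ≠ []) (List.map String.toList lines)) := by
  induction lines with
  | nil => simp
  | cons l ls ih =>
    by_cases h : l = ""
    · subst h
      simp [ih]
    · have h2 : l.toList ≠ [] := by
        intro hh
        exact h (by rw [← String.toList_inj]; simpa using hh)
      simp only [List.map_cons, List.filter_cons, h2, bne_iff_ne, ne_eq, h, not_false_iff,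
        if_true, decide_not]
      rw [pvLine_eq l, ih]
      simp

-- ===== VERDICT (by name: the statement is the Claim_ definition above) =====
theorem strip_margin_spec : Claim_equal_strip_margin := by
  intro s hdom
  show strip_margin s = strip_margin_alt s
  have hdomL : ∀ c ∈ s.toList, pvDomChar c = true := by
    have : pvDomStr s = true := hdom
    simpa [pvDomStr, List.all_eq_true] using this
  have hdomT : ∀ c ∈ (PySem.Str.strip s).toList, pvDomChar c = true := by
    intro c hc
    apply hdomL
    have hsub : (PySem.Str.strip s).toList.Sublist s.toList := by
      rw [PySem.Str.toList_strip]
      unfold PySem.Chars.strip PySem.Chars.rstrip PySem.Chars.lstrip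
      have h1 : (List.dropWhile PySem.Chars.isspace
          (List.dropWhile PySem.Chars.isspace s.toList).reverse).Sublist
          (List.dropWhile PySem.Chars.isspace s.toList).reverse := List.dropWhile_sublist _
      have h2 := h1.reverse
      simp at h2
      exact h2.trans (List.dropWhile_sublist _)
    exact hsub.subset hc
  unfold strip_margin strip_margin_alt
  rw [← String.toList_inj]
  have hR : (String.ofList (pvScan (PySem.Str.strip s).toList true)).toList =
      pvScan (PySem.Str.strip s).toList true := by simp
  rw [hR, pvScan_spec (PySem.Str.strip s).toList.length _ le_rfl hdomT true, if_pos rfl]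
  rw [PySem.Str.toList_join]
  unfold pvPieces
  rw [← pvSplitlines_eq, ← PySem.Str.splitlines_map_toList]
  rw [show ("\n" : String).toList = ['\n'] from rfl]
  exact congrArg (PySem.Chars.join ['\n']) (pvMapFilter _)
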